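-- pv_equiv track=rewrite | github.com/rv701/CAN-Sprinter | CAN_GUI.py | get_byte_bits
-- ===== SOURCE A (Python) =====
-- def get_byte_bits(number, offset, count):
--
-- 	mask = 0
--
-- 	for i in range(0, 8):
-- 		if (i >= offset) and (i < (offset + count)) :
-- 			mask = mask | 1
-- 		#if (i >= (offset + count)) :
-- 		#	mask = mask | 1
-- 		if (i < 7) :
-- 			mask = mask << 1
--
-- 	number = number & mask
-- 	number = number >> 8 - offset - count
--
-- 	return number
-- ===== SOURCE B (Python) =====
-- def get_byte_bits(number, offset, count):
--     ilo = max(0, offset)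
--     ihi = min(8, offset + count)
--     mask = 0 if ihi <= ilo else ((1 << (ihi - ilo)) - 1) << (8 - ihi)
--     return (number & mask) >> (8 - offset - count)
-- ===== Notes on version B (the rewrite author's own statement) =====
-- stated objective: simpler
-- what changed: Replaces the 8-iteration mask-building loop with a closed-form bit-arithmetic mask (clamp the bit range to [0,8), then ((1<<width)-1)<<(8-ihi)), keeping the final AND and the original right shift.
import Mathlib
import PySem

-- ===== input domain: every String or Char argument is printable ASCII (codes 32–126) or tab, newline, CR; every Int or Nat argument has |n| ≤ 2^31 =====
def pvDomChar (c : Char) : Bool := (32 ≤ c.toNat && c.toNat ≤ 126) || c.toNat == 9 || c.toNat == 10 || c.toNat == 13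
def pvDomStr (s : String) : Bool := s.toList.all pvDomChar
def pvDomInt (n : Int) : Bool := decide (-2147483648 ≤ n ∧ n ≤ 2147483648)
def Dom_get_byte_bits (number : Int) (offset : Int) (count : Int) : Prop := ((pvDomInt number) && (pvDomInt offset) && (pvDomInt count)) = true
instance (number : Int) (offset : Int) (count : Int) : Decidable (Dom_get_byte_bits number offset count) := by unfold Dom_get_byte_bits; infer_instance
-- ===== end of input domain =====

-- B replaces the 8-step mask-building loop by a closed-form mask; same AND and shift (objective: simpler).

-- ===== PORT A =====
-- the mask-building loop of A: for i in range(0,8): if i>=offset and i<offset+count: mask|=1; if i<7: mask<<=1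
def loopMask (offset : Int) (s : Int) : Int :=
  (PySem.List.pyRange 0 8 1).foldl (fun mask i =>
    let mask := if i ≥ offset ∧ i < s then PySem.Int.bor mask 1 else mask
    if i < 7 then mask <<< (1 : Nat) else mask) 0

def get_byte_bits (number : Int) (offset : Int) (count : Int) : Int :=
  let mask := loopMask offset (offset + count)
  let number := PySem.Int.band number mask
  -- Python '>>' raises on a negative shift count; Pre_ excludes 8 - offset - count < 0 (where toNat would clamp)
  number >>> (8 - offset - count).toNat

-- ===== PORT B =====
def get_byte_bits_alt (number : Int) (offset : Int) (count : Int) : Int :=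
  let ilo := max 0 offset
  let ihi := min 8 (offset + count)
  -- in the non-zero branch ihi - ilo > 0 and 8 - ihi ≥ 0, so toNat is exact
  let mask : Int := if ihi ≤ ilo then 0 else (((1 : Int) <<< (ihi - ilo).toNat) - 1) <<< (8 - ihi).toNat
  (PySem.Int.band number mask) >>> (8 - offset - count).toNat

-- ===== PRECONDITION & SPEC =====
-- A raises ValueError ("negative shift count") when offset + count > 8; exactly those inputs are excluded.
def Pre_get_byte_bits (number : Int) (offset : Int) (count : Int) : Prop := offset + count ≤ 8
instance (number : Int) (offset : Int) (count : Int) : Decidable (Pre_get_byte_bits number offset count) := by unfold Pre_get_byte_bits; infer_instance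
def pvWitness_get_byte_bits : Int × Int × Int := (171, 2, 3)

def Spec_get_byte_bits (number : Int) (offset : Int) (count : Int) (out : Int) : Prop := out = get_byte_bits_alt number offset count
instance (number : Int) (offset : Int) (count : Int) (out : Int) : Decidable (Spec_get_byte_bits number offset count out) := by unfold Spec_get_byte_bits; infer_instance

-- ===== CLAIM (what is proved, stated in full; the proofs are below) =====
def Claim_equal_get_byte_bits : Prop := ∀ (number : Int) (offset : Int) (count : Int), Dom_get_byte_bits number offset count → Pre_get_byte_bits number offset count → Spec_get_byte_bits number offset count (get_byte_bits number offset count)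

-- ===== LEMMAS AND PROOFS =====

-- the closed-form mask of B, as a function of the two range ends
def formMask (o : Int) (s : Int) : Int :=
  if min 8 s ≤ max 0 o then (0 : Int) else (((1 : Int) <<< (min 8 s - max 0 o).toNat) - 1) <<< (8 - min 8 s).toNat

-- the loop's conditions only see o, s through their clamps to [0,8]
theorem loopMask_clamp (o s : Int) :
    loopMask o s = loopMask (max 0 (min 8 o)) (max 0 (min 8 s)) := by
  unfold loopMask
  apply PySem.List.foldl_congr_mem
  intro acc i hi
  rw [PySem.List.mem_pyRange_one] at hi
  have h1 : (i ≥ o ∧ i < s) ↔ (i ≥ max 0 (min 8 o) ∧ i < max 0 (min 8 s)) := by omega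
  simp only [h1]

theorem formMask_clamp (o s : Int) :
    formMask o s = formMask (max 0 (min 8 o)) (max 0 (min 8 s)) := by
  unfold formMask
  rcases lt_or_ge (max 0 o) (min 8 s) with h | h
  · have e1 : min 8 (max 0 (min 8 s)) = min 8 s := by omega
    have e2 : max 0 (max 0 (min 8 o)) = max 0 o := by omega
    rw [if_neg (by omega), if_neg (by omega), e1, e2]
  · rw [if_pos (by omega), if_pos (by omega)]

theorem loopMask_eq_formMask_bounded (o s : Int) (ho : 0 ≤ o ∧ o ≤ 8) (hs : 0 ≤ s ∧ s ≤ 8) :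
    loopMask o s = formMask o s := by
  obtain ⟨ho0, ho8⟩ := ho
  obtain ⟨hs0, hs8⟩ := hs
  interval_cases o <;> interval_cases s <;> decide

theorem loopMask_eq_formMask (o s : Int) : loopMask o s = formMask o s := by
  rw [loopMask_clamp, formMask_clamp]
  exact loopMask_eq_formMask_bounded _ _ (by omega) (by omega)

-- ===== VERDICT (by name: the statement is the Claim_ definition above) =====
theorem get_byte_bits_spec : Claim_equal_get_byte_bits := by
  intro number offset count _ _
  unfold Spec_get_byte_bits get_byte_bits get_byte_bits_alt
  rw [loopMask_eq_formMask]
  show PySem.Int.band number (formMask offset (offset + count)) >>> (8 - offset - count).toNat = _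
  unfold formMask
  rfl
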